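-- pv_equiv track=rewrite | github.com/ijac13/spacedock | tests/test_pr_merge_template.py | section_bullets
-- ===== SOURCE A (Python) =====
-- def section_bullets(section_lines):
--     """Return top-level bullet text (no leading '- ') from a section's lines."""
--     bullets = []
--     for line in section_lines:
--         if line.startswith('- '):
--             bullets.append(line[2:])
--         elif line.startswith('  ') and bullets:
--             bullets[-1] += '\n' + line
--     return bullets
-- ===== SOURCE B (Python) =====
-- def section_bullets(section_lines):
--     """Return top-level bullet text (no leading '- ') from a section's lines."""
--     n = len(section_lines)
--     out = []
--     i = 0
--     # skip anything before the first bullet start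
--     while i < n and not section_lines[i].startswith('- '):
--         i += 1
--     # process one bullet segment at a time: [i, j) where j is the next start
--     while i < n:
--         j = i + 1
--         while j < n and not section_lines[j].startswith('- '):
--             j += 1
--         text = section_lines[i][2:]
--         for line in section_lines[i + 1:j]:
--             if line.startswith('  '):
--                 text += '\n' + line
--         out.append(text)
--         i = j
--     return out
-- ===== Notes on version B (the rewrite author's own statement) =====
-- stated objective: alternative
-- what changed: B segments the input at bullet-start indices and builds each bullet's text in its own per-segment pass, instead of A's single scan that mutates bullets[-1] in place.
import Mathlib
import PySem

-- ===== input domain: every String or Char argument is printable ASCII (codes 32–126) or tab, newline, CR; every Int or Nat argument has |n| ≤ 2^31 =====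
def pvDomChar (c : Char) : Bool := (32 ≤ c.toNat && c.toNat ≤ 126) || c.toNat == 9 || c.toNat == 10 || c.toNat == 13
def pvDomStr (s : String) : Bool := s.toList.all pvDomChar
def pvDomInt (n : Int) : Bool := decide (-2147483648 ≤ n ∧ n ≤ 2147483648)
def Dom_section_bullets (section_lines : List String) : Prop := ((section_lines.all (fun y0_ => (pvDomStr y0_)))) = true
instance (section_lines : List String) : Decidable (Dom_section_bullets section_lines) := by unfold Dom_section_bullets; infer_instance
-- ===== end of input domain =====

-- B builds each bullet from its own segment between bullet-start lines, instead of A's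
-- single scan mutating bullets[-1]; objective: alternative decomposition, same cost.

-- ===== PORT A =====
def section_bullets (section_lines : List String) : List String :=
  section_lines.foldl (fun bullets line =>
    if PySem.Str.startswith line "- " then
      bullets ++ [PySem.Str.slice line (some 2) none]
    else if PySem.Str.startswith line "  " && !bullets.isEmpty then
      bullets.dropLast ++ [bullets.getLastD "" ++ "\n" ++ line]
    else bullets) []

-- ===== PORT B =====
-- is this line a bullet start?
def pvIsStart (l : String) : Bool := PySem.Str.startswith l "- "

-- the inner 'for line in section_lines[i+1:j]' loop of Source B: extend text with continuations
def pvContFrom (t : String) (seg : List String) : String :=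
  seg.foldl (fun t l => if PySem.Str.startswith l "  " then t ++ "\n" ++ l else t) t

-- the outer while loop of Source B: one bullet per segment [i, j)
def pvSegGo (ls : List String) : List String :=
  match ls with
  | [] => []
  | l :: rest =>
    if pvIsStart l then
      pvContFrom (PySem.Str.slice l (some 2) none) (rest.takeWhile (fun x => !pvIsStart x))
        :: pvSegGo (rest.dropWhile (fun x => !pvIsStart x))
    else pvSegGo rest
termination_by ls.length
decreasing_by
· simpa using Nat.lt_succ_of_le (List.length_dropWhile_le _ _)
· simp

def section_bullets_alt (section_lines : List String) : List String :=
  pvSegGo section_lines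

-- ===== PRECONDITION & SPEC =====
def Spec_section_bullets (section_lines : List String) (out : List String) : Prop := out = section_bullets_alt section_lines
instance (section_lines : List String) (out : List String) : Decidable (Spec_section_bullets section_lines out) := by unfold Spec_section_bullets; infer_instance

-- ===== CLAIM (what is proved, stated in full; the proofs are below) =====
def Claim_equal_section_bullets : Prop := ∀ (section_lines : List String), Dom_section_bullets section_lines → Spec_section_bullets section_lines (section_bullets section_lines)

-- ===== LEMMAS AND PROOFS =====

-- A's loop step, named for the proofs
def pvStepA (bullets : List String) (line : String) : List String :=
  if PySem.Str.startswith line "- " then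
    bullets ++ [PySem.Str.slice line (some 2) none]
  else if PySem.Str.startswith line "  " && !bullets.isEmpty then
    bullets.dropLast ++ [bullets.getLastD "" ++ "\n" ++ line]
  else bullets

theorem section_bullets_eq_foldl (ls : List String) :
    section_bullets ls = ls.foldl pvStepA [] := rfl

-- invariant: folding A's step from an accumulator ending in an open bullet b
theorem pvFold_concat (ls : List String) : ∀ (bs : List String) (b : String),
    ls.foldl pvStepA (bs ++ [b])
      = bs ++ pvContFrom b (ls.takeWhile (fun x => !pvIsStart x))
          :: pvSegGo (ls.dropWhile (fun x => !pvIsStart x)) := by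
  induction ls with
  | nil => intro bs b; simp [pvContFrom, pvSegGo]
  | cons l rest ih =>
    intro bs b
    by_cases hs : pvIsStart l = true
    · have : pvStepA (bs ++ [b]) l = (bs ++ [b]) ++ [PySem.Str.slice l (some 2) none] := by
        simp [pvStepA, pvIsStart] at hs ⊢; simp [hs]
      rw [List.foldl_cons, this, ih (bs ++ [b]) _]
      simp [List.takeWhile_cons, List.dropWhile_cons, hs, pvContFrom, pvSegGo]
    · have hs' : pvIsStart l = false := by simpa using hs
      have htk : (l :: rest).takeWhile (fun x => !pvIsStart x)
          = l :: rest.takeWhile (fun x => !pvIsStart x) := by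
        simp [hs']
      have hdw : (l :: rest).dropWhile (fun x => !pvIsStart x)
          = rest.dropWhile (fun x => !pvIsStart x) := by
        simp [hs']
      by_cases hc : PySem.Str.startswith l "  " = true
      · have hc2 : PySem.Chars.startswith l.toList [' ', ' '] = true := by simpa using hc
        have hstep : pvStepA (bs ++ [b]) l = bs ++ [b ++ "\n" ++ l] := by
          simp [pvStepA, pvIsStart] at hs' ⊢
          simp [hs', hc2]
        rw [List.foldl_cons, hstep, ih bs _, htk, hdw]
        simp [pvContFrom, hc2]
      · have hc2 : PySem.Chars.startswith l.toList [' ', ' '] = false := by simpa using hc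
        have hstep : pvStepA (bs ++ [b]) l = bs ++ [b] := by
          simp [pvStepA, pvIsStart] at hs' ⊢
          simp [hs', hc2]
        rw [List.foldl_cons, hstep, ih bs b, htk, hdw]
        simp [pvContFrom, hc2]

theorem pvFold_nil (ls : List String) : ls.foldl pvStepA [] = pvSegGo ls := by
  induction ls with
  | nil => simp [pvSegGo]
  | cons l rest ih =>
    by_cases hs : pvIsStart l = true
    · have hstep : pvStepA [] l = [] ++ [PySem.Str.slice l (some 2) none] := by
        simp [pvStepA, pvIsStart] at hs ⊢; simp [hs]
      rw [List.foldl_cons, hstep, pvFold_concat]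
      simp [pvSegGo, hs]
    · have hs' : pvIsStart l = false := by simpa using hs
      have hstep : pvStepA [] l = [] := by
        simp [pvStepA, pvIsStart] at hs' ⊢; simp [hs']
      rw [List.foldl_cons, hstep, ih]
      conv_rhs => rw [pvSegGo]
      simp [hs']

-- ===== VERDICT (by name: the statement is the Claim_ definition above) =====
theorem section_bullets_spec : Claim_equal_section_bullets := by
  intro ls _
  unfold Spec_section_bullets section_bullets_alt
  rw [section_bullets_eq_foldl, pvFold_nil]
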